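-- pv_equiv track=rewrite | github.com/Phong3000000000/PSM | M02_P0213_00/structure/build_module_map.py | csv_model_id_to_model
-- ===== SOURCE A (Python) =====
-- MODEL_ID_PREFIX = "model_"
--
-- def csv_model_id_to_model(value: str | None, known_models: set[str]) -> str | None:
--     if not value:
--         return None
--     for model_name in sorted(known_models, key=len, reverse=True):
--         if value.endswith(model_name.replace(".", "_")):
--             return model_name
--     if value.startswith(MODEL_ID_PREFIX):
--         remainder = value[len(MODEL_ID_PREFIX) :]
--         return remainder.replace("_", ".")
--     return value
-- ===== SOURCE B (Python) =====
-- MODEL_ID_PREFIX = "model_"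
--
-- def _best_match(value, models):
--     best = None
--     for m in models:
--         if value.endswith(m.replace(".", "_")) and (best is None or len(best) < len(m)):
--             best = m
--     return best
--
-- def _fallback(value):
--     if value.startswith(MODEL_ID_PREFIX):
--         return value[len(MODEL_ID_PREFIX):].replace("_", ".")
--     return value
--
-- def csv_model_id_to_model(value, known_models):
--     if not value:
--         return None
--     best = _best_match(value, known_models)
--     return best if best is not None else _fallback(value)
-- ===== Notes on version B (the rewrite author's own statement) =====
-- stated objective: alternative
-- what changed: B drops A's per-call length-descending sort entirely: a single accumulator loop keeps the first strictly-longest matching model (ties keep the earlier element, exactly A's stable-sort-then-first-match result), and the prefix fallback is factored into a helper.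
import Mathlib
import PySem

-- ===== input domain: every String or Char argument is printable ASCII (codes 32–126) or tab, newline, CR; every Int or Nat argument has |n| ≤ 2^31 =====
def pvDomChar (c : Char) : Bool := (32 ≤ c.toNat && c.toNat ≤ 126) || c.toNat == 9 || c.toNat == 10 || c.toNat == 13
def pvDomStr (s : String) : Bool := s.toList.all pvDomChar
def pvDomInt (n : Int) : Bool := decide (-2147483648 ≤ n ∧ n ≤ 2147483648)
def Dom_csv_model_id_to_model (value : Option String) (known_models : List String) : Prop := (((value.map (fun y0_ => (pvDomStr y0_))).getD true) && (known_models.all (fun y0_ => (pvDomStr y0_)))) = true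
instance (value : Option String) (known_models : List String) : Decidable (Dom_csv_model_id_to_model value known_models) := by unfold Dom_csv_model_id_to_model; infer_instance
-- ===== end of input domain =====

-- B drops A's per-call length-descending sort: one accumulator loop keeps the first strictly-longest
-- matching model (same value as A's stable sort + first match), with the prefix fallback in a helper.

-- ===== PORT A =====
def csv_model_id_to_model (value : Option String) (known_models : List String) : Option String :=
  match value with
  | none => none
  | some v =>
    if v = "" then none
    else
      match (PySem.List.sorted known_models (fun m => PySem.Str.len m) true).find?
          (fun m => PySem.Str.endswith v (PySem.Str.replace m "." "_")) with
      | some model_name => some model_name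
      | none =>
        if PySem.Str.startswith v "model_" then
          some (PySem.Str.replace (PySem.Str.slice v (some 6) none) "_" ".")
        else some v

-- ===== PORT B =====
-- Source B's _best_match: running best, replaced only by a strictly longer matching model
def pvBestMatch (v : String) (models : List String) : Option String :=
  models.foldl (fun best m =>
    if PySem.Str.endswith v (PySem.Str.replace m "." "_") &&
       (match best with | none => true | some b => decide (PySem.Str.len b < PySem.Str.len m))
    then some m else best) none

-- Source B's _fallback
def pvFallback (v : String) : String :=
  if PySem.Str.startswith v "model_" then
    PySem.Str.replace (PySem.Str.slice v (some 6) none) "_" "."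
  else v

def csv_model_id_to_model_alt (value : Option String) (known_models : List String) : Option String :=
  match value with
  | none => none
  | some v =>
    if v = "" then none
    else
      match pvBestMatch v known_models with
      | some b => some b
      | none => some (pvFallback v)

-- ===== PRECONDITION & SPEC =====
def Spec_csv_model_id_to_model (value : Option String) (known_models : List String) (out : Option String) : Prop := out = csv_model_id_to_model_alt value known_models
instance (value : Option String) (known_models : List String) (out : Option String) : Decidable (Spec_csv_model_id_to_model value known_models out) := by unfold Spec_csv_model_id_to_model; infer_instance

-- ===== CLAIM =====
def Claim_equal_csv_model_id_to_model : Prop := ∀ (value : Option String) (known_models : List String), Dom_csv_model_id_to_model value known_models → Spec_csv_model_id_to_model value known_models (csv_model_id_to_model value known_models)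

-- ===== LEMMAS AND PROOFS =====

-- Inserting x into a key-descending list and taking the first match = combining x with the
-- previous first match by "strictly larger key wins, ties keep the old one".
theorem pv_find_insertBy {α κ : Type} [LinearOrder κ] (p : α → Bool) (k : α → κ) (x : α)
    (s : List α) (hs : s.Pairwise (fun a b => k b ≤ k a)) :
    (PySem.List.insertBy (fun a b => decide (k b < k a)) x s).find? p =
      (if p x && (match s.find? p with | none => true | some b => decide (k b < k x))
       then some x else s.find? p) := by
  induction s with
  | nil =>
    simp [PySem.List.insertBy, List.find?]
  | cons y ys ih =>
    have hpw := List.pairwise_cons.1 hs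
    by_cases hxy : k y < k x
    · -- x goes in front
      simp only [PySem.List.insertBy, decide_eq_true_eq, if_pos hxy]
      cases hpx : p x with
      | true =>
        have hC : (match (y :: ys).find? p with
            | none => true | some b => decide (k b < k x)) = true := by
          cases hf : (y :: ys).find? p with
          | none => rfl
          | some b =>
            have hb := List.mem_of_find?_eq_some hf
            have hby : k b ≤ k y := by
              rcases List.mem_cons.1 hb with rfl | hb'
              · exact le_refl _
              · exact hpw.1 b hb'
            simpa using lt_of_le_of_lt hby hxy
        simp only [List.find?] at hC
        simp [List.find?, hpx, hC]
      | false =>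
        simp [List.find?, hpx]
    · -- x goes after y
      simp only [PySem.List.insertBy, decide_eq_true_eq, if_neg hxy]
      cases hpy : p y with
      | true =>
        have hkb : ¬ (k y < k x) := hxy
        simp [List.find?, hpy, hkb]
      | false =>
        simp only [List.find?, hpy]
        exact ih hpw.2

-- First match scanning the stable length-descending sort = the accumulator loop that keeps
-- the first strictly-longest match (Source B's _best_match).
theorem pv_find_sorted_eq_foldl {α κ : Type} [LinearOrder κ] (p : α → Bool) (k : α → κ)
    (l : List α) :
    (PySem.List.sorted l k true).find? p =
      l.foldl (fun best m =>
        if p m && (match best with | none => true | some b => decide (k b < k m))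
        then some m else best) none := by
  induction l using List.reverseRecOn with
  | nil => simp [PySem.List.sorted_rev_eq_foldl_insertBy]
  | append_singleton l x ih =>
    rw [List.foldl_append, ← ih,
        PySem.List.sorted_rev_eq_foldl_insertBy, List.foldl_append]
    simp only [List.foldl]
    rw [← PySem.List.sorted_rev_eq_foldl_insertBy]
    exact pv_find_insertBy p k x _ (PySem.List.sorted_pairwise_rev l k)

-- ===== VERDICT =====
theorem csv_model_id_to_model_spec : Claim_equal_csv_model_id_to_model := by
  intro value known_models _
  unfold Spec_csv_model_id_to_model
  cases value with
  | none => rfl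
  | some v =>
    by_cases hv : v = ""
    · simp [csv_model_id_to_model, csv_model_id_to_model_alt, hv]
    · have h : (PySem.List.sorted known_models (fun m => PySem.Str.len m) true).find?
          (fun m => PySem.Str.endswith v (PySem.Str.replace m "." "_")) =
          pvBestMatch v known_models :=
        (pv_find_sorted_eq_foldl
            (fun m => PySem.Str.endswith v (PySem.Str.replace m "." "_"))
            (fun m => PySem.Str.len m) known_models).trans
          (by unfold pvBestMatch; congr 1; funext best m; cases best <;> rfl)
      simp only [csv_model_id_to_model, csv_model_id_to_model_alt, if_neg hv]
      rw [h]
      cases pvBestMatch v known_models with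
      | some b => rfl
      | none =>
        simp only [pvFallback]
        rw [apply_ite some]
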